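-- pv_equiv track=rewrite | github.com/krautz/SIP-Back-End | external_apis/steam/inventory.py | _compute_items_amount
-- ===== SOURCE A (Python) =====
-- from copy import deepcopy
--
-- def _compute_items_amount(
--     items: dict[str, dict], user_items_asset: list[dict], item_class_id_to_market_hash_name: dict[str, str]
-- ) -> dict[str, dict]:
--     """
--     Compute each item amount
--
--     :param items: formatted items
--     :param user_items_asset: user api items asset from an app
--     :param item_class_id_to_market_hash_name: mapper of class_id to market_hash_name
--
--     :returns: items with amount
--     """
--     items_with_amount = deepcopy(items)
--     for item_asset in user_items_asset:
--         item_asset_class_id = item_asset["classid"]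
--         market_hash_hame = item_class_id_to_market_hash_name.get(item_asset_class_id)
--         if market_hash_hame:
--             items_with_amount[market_hash_hame]["amount"] += int(item_asset["amount"])
--     return items_with_amount
-- ===== SOURCE B (Python) =====
-- def _compute_items_amount(items, user_items_asset, item_class_id_to_market_hash_name):
--     # Two-phase: aggregate per-name totals first, then apply each total once.
--     totals = {}
--     for asset in user_items_asset:
--         name = item_class_id_to_market_hash_name.get(asset["classid"])
--         if name:
--             totals[name] = totals.get(name, 0) + int(asset["amount"])
--     result = {}
--     for name, fields in items.items():
--         amount = totals.get(name)
--         if amount is None: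
--             result[name] = dict(fields)
--         else:
--             new_fields = dict(fields)
--             new_fields["amount"] += amount
--             result[name] = new_fields
--     return result
-- ===== Notes on version B (the rewrite author's own statement) =====
-- stated objective: alternative
-- what changed: A mutates the copied items inline once per asset during a single stateful scan; B is two-phase: it first aggregates per-name amount totals into a dict over the assets, then applies each accumulated total once while rebuilding the items dict entry by entry.
import Mathlib
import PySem

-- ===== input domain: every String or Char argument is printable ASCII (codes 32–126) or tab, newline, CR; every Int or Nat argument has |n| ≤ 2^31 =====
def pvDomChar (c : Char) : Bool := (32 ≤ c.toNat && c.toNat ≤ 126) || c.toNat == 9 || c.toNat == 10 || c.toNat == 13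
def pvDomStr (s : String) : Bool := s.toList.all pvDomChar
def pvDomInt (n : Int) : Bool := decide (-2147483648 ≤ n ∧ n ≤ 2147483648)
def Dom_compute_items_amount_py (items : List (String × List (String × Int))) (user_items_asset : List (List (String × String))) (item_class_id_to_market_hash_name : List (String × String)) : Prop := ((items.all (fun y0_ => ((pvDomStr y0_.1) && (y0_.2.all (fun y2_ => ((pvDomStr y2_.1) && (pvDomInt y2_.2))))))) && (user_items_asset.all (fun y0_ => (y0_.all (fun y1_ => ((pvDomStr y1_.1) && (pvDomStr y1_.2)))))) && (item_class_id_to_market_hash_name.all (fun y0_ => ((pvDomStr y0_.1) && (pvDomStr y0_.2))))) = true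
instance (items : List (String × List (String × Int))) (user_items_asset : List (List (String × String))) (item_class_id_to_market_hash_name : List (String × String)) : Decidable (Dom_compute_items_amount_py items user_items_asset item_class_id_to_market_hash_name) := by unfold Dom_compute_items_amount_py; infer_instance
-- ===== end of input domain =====

-- B replaces A's single stateful pass (mutating the items copy once per asset) by a two-phase
-- shape: aggregate per-name totals into a dict, then apply each total once; objective: alternative.

-- dict access on an association list (Python dict lookup = first match)
def pvLookup {α : Type} (l : List (String × α)) (k : String) : Option α :=
  match l with
  | [] => none
  | (k', v) :: t => if k' = k then some v else pvLookup t k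

-- fields["amount"] += v : add v to the first "amount" entry; none = KeyError
def pvBumpAmount (fields : List (String × Int)) (v : Int) : Option (List (String × Int)) :=
  match fields with
  | [] => none
  | (k, a) :: t =>
    if k = "amount" then some ((k, a + v) :: t)
    else (pvBumpAmount t v).map (fun r => (k, a) :: r)

-- ===== PORT A =====
-- items_with_amount[name]["amount"] += v : none = KeyError
def pvBumpItem (its : List (String × List (String × Int))) (name : String) (v : Int) :
    Option (List (String × List (String × Int))) :=
  match its with
  | [] => none
  | (k, f) :: t =>
    if k = name then (pvBumpAmount f v).map (fun g => (k, g) :: t)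
    else (pvBumpItem t name v).map (fun r => (k, f) :: r)

-- one iteration of A's loop body over the running items copy (none = an exception was raised)
def pvStepA (mapper : List (String × String))
    (st : Option (List (String × List (String × Int)))) (asset : List (String × String)) :
    Option (List (String × List (String × Int))) :=
  match st with
  | none => none
  | some its =>
    match pvLookup asset "classid" with
    | none => none
    | some cid =>
      match pvLookup mapper cid with
      | none => some its
      | some name =>
        if name = "" then some its
        else
          match pvLookup asset "amount" with
          | none => none
          | some s =>
            match PySem.Int.ofStr? s with
            | none => none
            | some v => pvBumpItem its name v

def compute_items_amount_py (items : List (String × List (String × Int))) (user_items_asset : List (List (String × String))) (item_class_id_to_market_hash_name : List (String × String)) : List (String × List (String × Int)) :=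
  (user_items_asset.foldl (pvStepA item_class_id_to_market_hash_name) (some items)).getD items

-- ===== PORT B =====
-- phase 1: totals[name] = totals.get(name, 0) + int(asset["amount"])
def pvStepTotals (mapper : List (String × String))
    (st : Option (PySem.Dict String Int)) (asset : List (String × String)) :
    Option (PySem.Dict String Int) :=
  match st with
  | none => none
  | some d =>
    match pvLookup asset "classid" with
    | none => none
    | some cid =>
      match pvLookup mapper cid with
      | none => some d
      | some name =>
        if name = "" then some d
        else
          match pvLookup asset "amount" with
          | none => none
          | some s =>
            match PySem.Int.ofStr? s with
            | none => none
            | some v => some (d.insert name (d.getD name 0 + v))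

-- phase 2: build the result dict entry by entry, applying the total where one exists
def pvApplyEntry (totals : PySem.Dict String Int)
    (st : Option (PySem.Dict String (List (String × Int)))) (e : String × List (String × Int)) :
    Option (PySem.Dict String (List (String × Int))) :=
  match st with
  | none => none
  | some d =>
    match totals.get? e.1 with
    | none => some (d.insert e.1 e.2)
    | some t =>
      match pvBumpAmount e.2 t with
      | none => none
      | some g => some (d.insert e.1 g)

def compute_items_amount_py_alt (items : List (String × List (String × Int))) (user_items_asset : List (List (String × String))) (item_class_id_to_market_hash_name : List (String × String)) : List (String × List (String × Int)) :=
  match user_items_asset.foldl (pvStepTotals item_class_id_to_market_hash_name) (some PySem.Dict.empty) with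
  | none => items
  | some totals =>
    match items.foldl (pvApplyEntry totals) (some PySem.Dict.empty) with
    | none => items
    | some d => d.items

-- ===== PRECONDITION & SPEC =====
-- name is a key of items and its fields carry an "amount" entry (else A's update raises KeyError)
def pvOkName (items : List (String × List (String × Int))) (n : String) : Bool :=
  match pvLookup items n with
  | none => false
  | some f => (pvLookup f "amount").isSome

-- the loop body of A terminates normally on this asset
def pvOkAsset (items : List (String × List (String × Int))) (mapper : List (String × String))
    (a : List (String × String)) : Bool :=
  match pvLookup a "classid" with
  | none => false
  | some cid =>
    match pvLookup mapper cid with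
    | none => true
    | some name =>
      if name = "" then true
      else
        pvOkName items name &&
        (match pvLookup a "amount" with
         | none => false
         | some s => (PySem.Int.ofStr? s).isSome)

-- Pre_ excludes exactly the inputs where A raises (missing "classid", a mapped name absent from
-- items or without an "amount" field — KeyError — or an unparsable amount string — ValueError);
-- the Nodup conjunct only says that items encodes a Python dict, whose keys are distinct by nature.
def Pre_compute_items_amount_py (items : List (String × List (String × Int))) (user_items_asset : List (List (String × String))) (item_class_id_to_market_hash_name : List (String × String)) : Prop :=
  (items.map Prod.fst).Nodup ∧
  ∀ a ∈ user_items_asset, pvOkAsset items item_class_id_to_market_hash_name a = true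
instance (items : List (String × List (String × Int))) (user_items_asset : List (List (String × String))) (item_class_id_to_market_hash_name : List (String × String)) : Decidable (Pre_compute_items_amount_py items user_items_asset item_class_id_to_market_hash_name) := by unfold Pre_compute_items_amount_py; infer_instance

def pvWitness_compute_items_amount_py : (List (String × List (String × Int))) × (List (List (String × String))) × (List (String × String)) :=
  ([("x", [("amount", 3)]), ("y", [("amount", 0)])],
   [[("classid", "c1"), ("amount", "2")], [("classid", "c2"), ("amount", "5")]],
   [("c1", "x"), ("c3", "y")])

def Spec_compute_items_amount_py (items : List (String × List (String × Int))) (user_items_asset : List (List (String × String))) (item_class_id_to_market_hash_name : List (String × String)) (out : List (String × List (String × Int))) : Prop := out = compute_items_amount_py_alt items user_items_asset item_class_id_to_market_hash_name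
instance (items : List (String × List (String × Int))) (user_items_asset : List (List (String × String))) (item_class_id_to_market_hash_name : List (String × String)) (out : List (String × List (String × Int))) : Decidable (Spec_compute_items_amount_py items user_items_asset item_class_id_to_market_hash_name out) := by unfold Spec_compute_items_amount_py; infer_instance

-- ===== CLAIM (what is proved, stated in full; the proofs are below) =====
def Claim_equal_compute_items_amount_py : Prop := ∀ (items : List (String × List (String × Int))) (user_items_asset : List (List (String × String))) (item_class_id_to_market_hash_name : List (String × String)), Dom_compute_items_amount_py items user_items_asset item_class_id_to_market_hash_name → Pre_compute_items_amount_py items user_items_asset item_class_id_to_market_hash_name → Spec_compute_items_amount_py items user_items_asset item_class_id_to_market_hash_name (compute_items_amount_py items user_items_asset item_class_id_to_market_hash_name)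

-- ===== LEMMAS AND PROOFS =====

-- total (exception-free) versions of the updates, for the proofs only
def bA (f : List (String × Int)) (v : Int) : List (String × Int) :=
  match f with
  | [] => []
  | (k, a) :: t => if k = "amount" then (k, a + v) :: t else (k, a) :: bA t v

def bI (its : List (String × List (String × Int))) (n : String) (v : Int) :
    List (String × List (String × Int)) :=
  match its with
  | [] => []
  | (k, f) :: t => if k = n then (k, bA f v) :: t else (k, f) :: bI t n v

-- the (name, value) contributions A's loop makes, in loop order
def contrib1 (mapper : List (String × String)) (a : List (String × String)) : List (String × Int) :=
  match pvLookup a "classid" with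
  | none => []
  | some cid =>
    match pvLookup mapper cid with
    | none => []
    | some name =>
      if name = "" then []
      else
        match pvLookup a "amount" with
        | none => []
        | some s =>
          match PySem.Int.ofStr? s with
          | none => []
          | some v => [(name, v)]

def contribsT (mapper : List (String × String)) (assets : List (List (String × String))) :
    List (String × Int) :=
  assets.flatMap (contrib1 mapper)

def sumFor (cs : List (String × Int)) (n : String) : Int :=
  match cs with
  | [] => 0
  | p :: t => (if p.1 = n then p.2 else 0) + sumFor t n

def applyListT (its : List (String × List (String × Int))) (cs : List (String × Int)) :
    List (String × List (String × Int)) :=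
  cs.foldl (fun s p => bI s p.1 p.2) its

def wcD (d : PySem.Dict String Int) (cs : List (String × Int)) : PySem.Dict String Int :=
  cs.foldl (fun d p => d.insert p.1 (d.getD p.1 0 + p.2)) d

theorem bA_zero (f : List (String × Int)) : bA f 0 = f := by
  induction f with
  | nil => rfl
  | cons p t ih => cases p with | mk k a => simp [bA, ih]

theorem bA_add (f : List (String × Int)) (v w : Int) : bA (bA f v) w = bA f (v + w) := by
  induction f with
  | nil => rfl
  | cons p t ih =>
    cases p with | mk k a =>
    by_cases h : k = "amount"
    · subst h; simp [bA, add_assoc]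
    · simp [bA, h, ih]

theorem isSome_lookup_bA (f : List (String × Int)) (v : Int) (k : String) :
    (pvLookup (bA f v) k).isSome = (pvLookup f k).isSome := by
  induction f with
  | nil => rfl
  | cons p t ih =>
    cases p with | mk k' a =>
    by_cases h : k' = "amount"
    · subst h
      simp only [bA, if_pos rfl, pvLookup]
      by_cases h2 : "amount" = k <;> simp [pvLookup, h2, ih]
    · simp only [bA, if_neg h, pvLookup]
      by_cases h2 : k' = k <;> simp [pvLookup, h2, ih]

theorem bumpAmount_eq (f : List (String × Int)) (v : Int) :
    pvBumpAmount f v = if (pvLookup f "amount").isSome then some (bA f v) else none := by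
  induction f with
  | nil => rfl
  | cons p t ih =>
    cases p with | mk k a =>
    by_cases h : k = "amount"
    · subst h; simp [pvBumpAmount, pvLookup, bA]
    · simp only [pvBumpAmount, if_neg h, pvLookup, bA, ih]
      by_cases h2 : (pvLookup t "amount").isSome <;> simp [h2, h]

theorem lookup_bI (its : List (String × List (String × Int))) (m : String) (w : Int) (n : String) :
    pvLookup (bI its m w) n =
      if n = m then (pvLookup its n).map (fun f => bA f w) else pvLookup its n := by
  induction its with
  | nil => simp [bI, pvLookup]
  | cons p t ih =>
    cases p with | mk k f =>
    by_cases hk : k = m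
    · subst hk
      simp only [bI, if_pos rfl, pvLookup]
      by_cases hn : k = n
      · subst hn; simp [pvLookup]
      · have hn' : ¬ n = k := fun q => hn q.symm
        simp [pvLookup, hn, hn', ih]
    · simp only [bI, if_neg hk, pvLookup]
      by_cases hn : k = n
      · subst hn
        have hk' : ¬ k = m := hk
        simp [pvLookup, hk']
      · simp [pvLookup, hn, ih]
theorem okName_bI (its : List (String × List (String × Int))) (m : String) (w : Int) (n : String) :
    pvOkName (bI its m w) n = pvOkName its n := by
  unfold pvOkName
  rw [lookup_bI]
  by_cases h : n = m
  · simp only [h, if_pos rfl]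
    cases pvLookup its m with
    | none => rfl
    | some f => simp [isSome_lookup_bA]
  · simp [h]

theorem keys_bI (its : List (String × List (String × Int))) (n : String) (v : Int) :
    (bI its n v).map Prod.fst = its.map Prod.fst := by
  induction its with
  | nil => rfl
  | cons p t ih =>
    cases p with | mk k f =>
    by_cases h : k = n <;> simp [bI, h, ih]

theorem pvOkName_cons (k : String) (f : List (String × Int))
    (t : List (String × List (String × Int))) (n : String) :
    pvOkName ((k, f) :: t) n = if k = n then (pvLookup f "amount").isSome else pvOkName t n := by
  by_cases h : k = n <;> simp [pvOkName, pvLookup, h]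

theorem bumpItem_eq (its : List (String × List (String × Int))) (n : String) (v : Int) :
    pvBumpItem its n v = if pvOkName its n then some (bI its n v) else none := by
  induction its with
  | nil => rfl
  | cons p t ih =>
    cases p with | mk k f =>
    by_cases h : k = n
    · subst h
      simp only [pvBumpItem, if_pos rfl, bI, pvOkName_cons, bumpAmount_eq]
      by_cases h2 : (pvLookup f "amount").isSome <;> simp [h2]
    · simp only [pvBumpItem, if_neg h, bI, if_neg h, ih, pvOkName_cons]
      by_cases h2 : pvOkName t n <;> simp [h, h2]

theorem map_untouched (t : List (String × List (String × Int))) (n : String) (v : Int)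
    (h : ∀ e ∈ t, e.1 ≠ n) :
    t.map (fun e => if e.1 = n then (e.1, bA e.2 v) else e) = t := by
  induction t with
  | nil => rfl
  | cons p t ih =>
    have h1 := h p (by simp)
    simp [h1, ih (fun e he => h e (by simp [he]))]

theorem bI_map (its : List (String × List (String × Int))) (n : String) (v : Int)
    (hnd : (its.map Prod.fst).Nodup) :
    bI its n v = its.map (fun e => if e.1 = n then (e.1, bA e.2 v) else e) := by
  induction its with
  | nil => rfl
  | cons p t ih =>
    cases p with | mk k f =>
    simp only [List.map_cons, List.nodup_cons] at hnd
    by_cases h : k = n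
    · subst h
      have hm := map_untouched t k v (fun e he hek => hnd.1 (hek ▸ List.mem_map_of_mem he))
      simp [bI, hm]
    · simp [bI, h, ih hnd.2]

theorem applyListT_char (cs : List (String × Int)) :
    ∀ its : List (String × List (String × Int)), (its.map Prod.fst).Nodup →
    applyListT its cs = its.map (fun e => (e.1, bA e.2 (sumFor cs e.1))) := by
  induction cs with
  | nil =>
    intro its _
    simp [applyListT, sumFor, bA_zero]
  | cons p t ih =>
    intro its hnd
    have step : applyListT its (p :: t) = applyListT (bI its p.1 p.2) t := rfl
    rw [step, ih _ (by rw [keys_bI]; exact hnd), bI_map its p.1 p.2 hnd, List.map_map]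
    apply List.map_congr_left
    intro e _
    by_cases h : e.1 = p.1
    · simp [Function.comp, h, bA_add, sumFor]
    · have h2 : ¬ p.1 = e.1 := fun q => h q.symm
      simp [Function.comp, h, h2, sumFor]

theorem sumFor_eq_zero (cs : List (String × Int)) (n : String)
    (h : n ∉ cs.map Prod.fst) : sumFor cs n = 0 := by
  induction cs with
  | nil => rfl
  | cons p t ih =>
    simp only [List.map_cons, List.mem_cons] at h
    have h1 : ¬ p.1 = n := fun q => h (Or.inl q.symm)
    have h2 : n ∉ List.map Prod.fst t := fun q => h (Or.inr q)
    simp [sumFor, h1, ih h2]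

theorem okAsset_bI (its : List (String × List (String × Int))) (mapper : List (String × String))
    (m : String) (w : Int) (a : List (String × String)) :
    pvOkAsset (bI its m w) mapper a = pvOkAsset its mapper a := by
  unfold pvOkAsset
  cases pvLookup a "classid" with
  | none => rfl
  | some cid =>
    simp only []
    cases pvLookup mapper cid with
    | none => rfl
    | some name =>
      simp only []
      by_cases h : name = "" <;> simp [h, okName_bI]

-- A's loop computes applyListT over the contributions
theorem foldA_eq (mapper : List (String × String)) (assets : List (List (String × String))) :
    ∀ its : List (String × List (String × Int)),
    (∀ a ∈ assets, pvOkAsset its mapper a = true) →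
    assets.foldl (pvStepA mapper) (some its) = some (applyListT its (contribsT mapper assets)) := by
  induction assets with
  | nil => intro its _; rfl
  | cons a t ih =>
    intro its h
    have ha := h a (by simp)
    have ht : ∀ b ∈ t, pvOkAsset its mapper b = true := fun b hb => h b (by simp [hb])
    simp only [List.foldl_cons]
    unfold pvOkAsset at ha
    cases hc : pvLookup a "classid" with
    | none => rw [hc] at ha; simp only [] at ha; exact absurd ha (by simp)
    | some cid =>
      rw [hc] at ha
      simp only [] at ha
      cases hm : pvLookup mapper cid with
      | none =>
        have hstep : pvStepA mapper (some its) a = some its := by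
          simp [pvStepA, hc, hm]
        have hcon : contribsT mapper (a :: t) = contribsT mapper t := by
          simp [contribsT, contrib1, hc, hm]
        rw [hstep, hcon]; exact ih its ht
      | some name =>
        rw [hm] at ha
        simp only [] at ha
        by_cases hn : name = ""
        · have hstep : pvStepA mapper (some its) a = some its := by
            simp [pvStepA, hc, hm, hn]
          have hcon : contribsT mapper (a :: t) = contribsT mapper t := by
            simp [contribsT, contrib1, hc, hm, hn]
          rw [hstep, hcon]; exact ih its ht
        · rw [if_neg hn] at ha
          cases hat : pvLookup a "amount" with
          | none => rw [hat] at ha; simp only [] at ha; exact absurd ha (by simp)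
          | some s =>
            rw [hat] at ha
            simp only [] at ha
            cases hv : PySem.Int.ofStr? s with
            | none => rw [hv] at ha; simp at ha
            | some v =>
              rw [hv] at ha
              simp only [Bool.and_eq_true] at ha
              have hstep : pvStepA mapper (some its) a = some (bI its name v) := by
                simp [pvStepA, hc, hm, hn, hat, hv, bumpItem_eq, ha.1]
              have hcon : contribsT mapper (a :: t) = (name, v) :: contribsT mapper t := by
                simp [contribsT, contrib1, hc, hm, hn, hat, hv]
              have ht' : ∀ b ∈ t, pvOkAsset (bI its name v) mapper b = true := by
                intro b hb; rw [okAsset_bI]; exact ht b hb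
              rw [hstep, hcon]
              exact ih (bI its name v) ht'

-- B's first loop computes the weighted counter of the same contributions
theorem foldTotals_eq (mapper : List (String × String)) (items0 : List (String × List (String × Int)))
    (assets : List (List (String × String))) :
    ∀ d : PySem.Dict String Int,
    (∀ a ∈ assets, pvOkAsset items0 mapper a = true) →
    assets.foldl (pvStepTotals mapper) (some d) = some (wcD d (contribsT mapper assets)) := by
  induction assets with
  | nil => intro d _; rfl
  | cons a t ih =>
    intro d h
    have ha := h a (by simp)
    have ht : ∀ b ∈ t, pvOkAsset items0 mapper b = true := fun b hb => h b (by simp [hb])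
    simp only [List.foldl_cons]
    unfold pvOkAsset at ha
    cases hc : pvLookup a "classid" with
    | none => rw [hc] at ha; simp only [] at ha; exact absurd ha (by simp)
    | some cid =>
      rw [hc] at ha
      simp only [] at ha
      cases hm : pvLookup mapper cid with
      | none =>
        have hstep : pvStepTotals mapper (some d) a = some d := by
          simp [pvStepTotals, hc, hm]
        have hcon : contribsT mapper (a :: t) = contribsT mapper t := by
          simp [contribsT, contrib1, hc, hm]
        rw [hstep, hcon]; exact ih d ht
      | some name =>
        rw [hm] at ha
        simp only [] at ha
        by_cases hn : name = ""
        · have hstep : pvStepTotals mapper (some d) a = some d := by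
            simp [pvStepTotals, hc, hm, hn]
          have hcon : contribsT mapper (a :: t) = contribsT mapper t := by
            simp [contribsT, contrib1, hc, hm, hn]
          rw [hstep, hcon]; exact ih d ht
        · rw [if_neg hn] at ha
          cases hat : pvLookup a "amount" with
          | none => rw [hat] at ha; simp only [] at ha; exact absurd ha (by simp)
          | some s =>
            rw [hat] at ha
            simp only [] at ha
            cases hv : PySem.Int.ofStr? s with
            | none => rw [hv] at ha; simp at ha
            | some v =>
              have hstep : pvStepTotals mapper (some d) a
                  = some (d.insert name (d.getD name 0 + v)) := by
                simp [pvStepTotals, hc, hm, hn, hat, hv]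
              have hcon : contribsT mapper (a :: t) = (name, v) :: contribsT mapper t := by
                simp [contribsT, contrib1, hc, hm, hn, hat, hv]
              rw [hstep, hcon]
              exact ih (d.insert name (d.getD name 0 + v)) ht

theorem getD_wcD (cs : List (String × Int)) :
    ∀ d : PySem.Dict String Int, ∀ n, (wcD d cs).getD n 0 = d.getD n 0 + sumFor cs n := by
  induction cs with
  | nil => intro d n; simp [wcD, sumFor]
  | cons p t ih =>
    intro d n
    have : wcD d (p :: t) = wcD (d.insert p.1 (d.getD p.1 0 + p.2)) t := rfl
    rw [this, ih, PySem.Dict.getD_insert]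
    by_cases h : n = p.1
    · simp [h, sumFor]; ring
    · have h2 : ¬ p.1 = n := fun q => h q.symm
      simp [h, h2, sumFor]

theorem contains_wcD (cs : List (String × Int)) :
    ∀ d : PySem.Dict String Int, ∀ n,
    (wcD d cs).contains n = (d.contains n || decide (n ∈ cs.map Prod.fst)) := by
  induction cs with
  | nil => intro d n; simp [wcD]
  | cons p t ih =>
    intro d n
    have : wcD d (p :: t) = wcD (d.insert p.1 (d.getD p.1 0 + p.2)) t := rfl
    rw [this, ih, PySem.Dict.contains_insert]
    by_cases h : n = p.1
    · simp [h]
    · have hb : (n == p.1) = false := by simp [h]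
      have hm : decide (n ∈ List.map Prod.fst (p :: t)) = decide (n ∈ List.map Prod.fst t) := by
        rw [decide_eq_decide]
        simp [List.map_cons, List.mem_cons, h]
      rw [hm, hb, Bool.false_or]

theorem okName_of_mem_contribs (items : List (String × List (String × Int)))
    (mapper : List (String × String)) (assets : List (List (String × String)))
    (h : ∀ a ∈ assets, pvOkAsset items mapper a = true) :
    ∀ p ∈ contribsT mapper assets, pvOkName items p.1 = true := by
  intro p hp
  simp only [contribsT, List.mem_flatMap] at hp
  obtain ⟨a, ha, hpa⟩ := hp
  have hok := h a ha
  unfold pvOkAsset at hok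
  unfold contrib1 at hpa
  cases hc : pvLookup a "classid" with
  | none => rw [hc] at hpa; simp only [] at hpa; simp at hpa
  | some cid =>
    rw [hc] at hok hpa
    simp only [] at hok hpa
    cases hm : pvLookup mapper cid with
    | none => rw [hm] at hpa; simp only [] at hpa; simp at hpa
    | some name =>
      rw [hm] at hok hpa
      simp only [] at hok hpa
      by_cases hn : name = ""
      · rw [if_pos hn] at hpa; simp at hpa
      · rw [if_neg hn] at hok hpa
        cases hat : pvLookup a "amount" with
        | none => rw [hat] at hpa; simp only [] at hpa; simp at hpa
        | some s =>
          rw [hat] at hok hpa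
          simp only [] at hok hpa
          cases hv : PySem.Int.ofStr? s with
          | none => rw [hv] at hpa; simp only [] at hpa; simp at hpa
          | some v =>
            rw [hv] at hpa
            simp only [] at hpa
            simp only [List.mem_singleton] at hpa
            subst hpa
            simp only [Bool.and_eq_true] at hok
            exact hok.1

theorem lookup_of_mem_nodup (its : List (String × List (String × Int)))
    (hnd : (its.map Prod.fst).Nodup) (e : String × List (String × Int)) (he : e ∈ its) :
    pvLookup its e.1 = some e.2 := by
  induction its with
  | nil => simp at he
  | cons p t ih =>
    simp only [List.map_cons, List.nodup_cons] at hnd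
    rcases List.mem_cons.1 he with rfl | hm
    · simp [pvLookup]
    · have hne : p.1 ≠ e.1 := by
        intro hq
        exact hnd.1 (hq ▸ List.mem_map_of_mem hm)
      simp [pvLookup, hne, ih hnd.2 hm]

-- the value B's second loop stores for one entry
def phi (totals : PySem.Dict String Int) (e : String × List (String × Int)) :
    List (String × Int) :=
  match totals.get? e.1 with
  | none => e.2
  | some t => bA e.2 t

-- B's second loop, with an exact value at every entry, is a pure insert-fold
theorem foldApply_eq (totals : PySem.Dict String Int) (its : List (String × List (String × Int)))
    (hok : ∀ e ∈ its, ∀ t, totals.get? e.1 = some t → (pvLookup e.2 "amount").isSome = true) :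
    ∀ d : PySem.Dict String (List (String × Int)),
    its.foldl (pvApplyEntry totals) (some d) =
      some (its.foldl (fun d e => d.insert e.1 (phi totals e)) d) := by
  induction its with
  | nil => intro d; rfl
  | cons e t ih =>
    intro d
    have he := hok e (by simp)
    have ht : ∀ e' ∈ t, ∀ u, totals.get? e'.1 = some u → (pvLookup e'.2 "amount").isSome = true :=
      fun e' he' => hok e' (by simp [he'])
    simp only [List.foldl_cons]
    cases hg : totals.get? e.1 with
    | none =>
      have hstep : pvApplyEntry totals (some d) e = some (d.insert e.1 e.2) := by
        simp [pvApplyEntry, hg]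
      have hphi : phi totals e = e.2 := by simp [phi, hg]
      rw [hstep, hphi]
      exact ih ht (d.insert e.1 e.2)
    | some u =>
      have hstep : pvApplyEntry totals (some d) e = some (d.insert e.1 (bA e.2 u)) := by
        simp [pvApplyEntry, hg, bumpAmount_eq, he u hg]
      have hphi : phi totals e = bA e.2 u := by simp [phi, hg]
      rw [hstep, hphi]
      exact ih ht (d.insert e.1 (bA e.2 u))

-- ===== VERDICT (by name: the statement is the Claim_ definition above) =====
theorem compute_items_amount_py_spec : Claim_equal_compute_items_amount_py := by
  intro items assets mapper _ hpre
  obtain ⟨hnd, hok⟩ := hpre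
  unfold Spec_compute_items_amount_py
  unfold compute_items_amount_py compute_items_amount_py_alt
  rw [foldA_eq mapper assets items hok,
    foldTotals_eq mapper items assets PySem.Dict.empty hok]
  simp only [Option.getD_some]
  set cs := contribsT mapper assets with hcs
  set totals := wcD PySem.Dict.empty cs with htot
  have hcontains : ∀ n, totals.contains n = decide (n ∈ cs.map Prod.fst) := by
    intro n; rw [htot, contains_wcD]; simp
  have hgetD : ∀ n, totals.getD n 0 = sumFor cs n := by
    intro n; rw [htot, getD_wcD]; simp
  have hamt : ∀ e ∈ items, ∀ t, totals.get? e.1 = some t → (pvLookup e.2 "amount").isSome = true := by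
    intro e he t hg
    have hcont : totals.contains e.1 = true := by
      rw [PySem.Dict.contains_eq_isSome_get?, hg]; rfl
    rw [hcontains] at hcont
    have hmem : e.1 ∈ cs.map Prod.fst := by simpa using hcont
    obtain ⟨p, hp, hp1⟩ := List.mem_map.1 hmem
    have := okName_of_mem_contribs items mapper assets hok p hp
    rw [hp1] at this
    unfold pvOkName at this
    rw [lookup_of_mem_nodup items hnd e he] at this
    exact this
  rw [foldApply_eq totals items hamt PySem.Dict.empty]
  simp only []
  rw [PySem.Dict.items_foldl_insert_fresh items Prod.fst (fun e => phi totals e)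
    PySem.Dict.empty (fun e _ => by simp) hnd]
  rw [applyListT_char cs items hnd]
  have hemp : (PySem.Dict.empty : PySem.Dict String (List (String × Int))).items = [] := rfl
  rw [hemp, List.nil_append]
  apply List.map_congr_left
  intro e he
  cases hg : totals.get? e.1 with
  | none =>
    have hcont : totals.contains e.1 = false := by
      rw [PySem.Dict.contains_eq_isSome_get?, hg]; rfl
    rw [hcontains] at hcont
    have hnm : e.1 ∉ cs.map Prod.fst := by simpa using hcont
    simp [phi, hg, sumFor_eq_zero cs e.1 hnm, bA_zero]
  | some t =>
    have hdt : totals.getD e.1 0 = t := PySem.Dict.getD_of_get?_eq_some totals 0 hg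
    rw [hgetD] at hdt
    simp [phi, hg, hdt]
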